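-- pv_equiv track=rewrite | github.com/adampower48/NLP | main.py | gen_indices
-- ===== SOURCE A (Python) =====
-- from collections import Counter
--
-- def gen_indices(words, max_indices=1000):
--     UNKNOWN_TOKEN = "<UNK>"
--     UNKNOWN_INDEX = 0
--     counter = Counter(words)
--     count_pairs = sorted(counter.items(), key=lambda x: (-x[1], x[0]))
--
--     words_to_ind = {}
--     ind_to_words = {UNKNOWN_INDEX: UNKNOWN_TOKEN}
--     for i, (w, _) in enumerate(count_pairs):
--         if i < max_indices:
--             words_to_ind[w] = i + 1
--             ind_to_words[i + 1] = w
--         else: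
--             words_to_ind[w] = UNKNOWN_INDEX
--
--     return words_to_ind, ind_to_words
-- ===== SOURCE B (Python) =====
-- def gen_indices(words, max_indices=1000):
--     # Sort the words themselves, collect (word, count) runs (word-ascending),
--     # then a stable sort by descending count yields the (-count, word) ranking
--     # without building a Counter or comparing tuple keys.
--     sw = sorted(words)
--     groups = []
--     i, n = 0, len(sw)
--     while i < n:
--         j = i + 1
--         while j < n and sw[j] == sw[i]:
--             j += 1
--         groups.append((sw[i], j - i))
--         i = j
--     ordered = sorted(groups, key=lambda g: -g[1])  # stable: ties stay alphabetical
--     k = max(max_indices, 0)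
--     top, rest = ordered[:k], ordered[k:]
--     words_to_ind = dict([(w, i + 1) for i, (w, _) in enumerate(top)]
--                         + [(w, 0) for w, _ in rest])
--     ind_to_words = dict([(0, "<UNK>")]
--                         + [(i + 1, w) for i, (w, _) in enumerate(top)])
--     return words_to_ind, ind_to_words
-- ===== Notes on version B (the rewrite author's own statement) =====
-- stated objective: alternative
-- what changed: Replaces Counter + sort by tuple key (-count, word) + one enumerate loop with branches by: sort the words themselves, collect (word,count) runs by two-pointer scan, stable-sort the runs by descending count alone (stability supplies the alphabetical tie-break), then split at max(max_indices,0) and build both dicts from the two slices with no per-element branch.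
import Mathlib
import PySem

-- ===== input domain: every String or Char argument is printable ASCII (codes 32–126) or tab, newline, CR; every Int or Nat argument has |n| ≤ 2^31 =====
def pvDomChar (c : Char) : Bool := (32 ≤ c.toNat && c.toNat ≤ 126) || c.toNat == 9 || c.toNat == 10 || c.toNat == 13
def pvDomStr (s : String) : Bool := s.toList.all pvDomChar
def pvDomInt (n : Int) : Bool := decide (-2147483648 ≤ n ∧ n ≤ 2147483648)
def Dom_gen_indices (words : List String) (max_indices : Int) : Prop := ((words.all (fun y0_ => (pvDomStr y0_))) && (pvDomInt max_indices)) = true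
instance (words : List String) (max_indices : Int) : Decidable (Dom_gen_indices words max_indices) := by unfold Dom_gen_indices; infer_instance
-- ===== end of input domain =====

-- B replaces Counter + sort by tuple key + branchy enumerate loop with sort-words / run-length
-- groups / stable sort by descending count / split at k — an alternative algorithm of similar cost.


-- ===== PORT A =====
-- literal transliteration of Source A: Counter, sorted by (-count, word), one enumerate loop
-- filling both dicts (dicts returned as their .items association lists)
def gen_indices (words : List String) (max_indices : Int) : (List (String × Int)) × (List (Int × String)) :=
  let counter := PySem.Dict.counter words
  let count_pairs := PySem.List.sorted2 counter.items (fun x => -x.2) (fun x => x.1)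
  let st := (PySem.List.enumerate count_pairs).foldl
    (fun (st : PySem.Dict String Int × PySem.Dict Int String) p =>
      if p.1 < max_indices then (st.1.insert p.2.1 (p.1 + 1), st.2.insert (p.1 + 1) p.2.1)
      else (st.1.insert p.2.1 0, st.2))
    (PySem.Dict.empty, PySem.Dict.ofList [((0 : Int), "<UNK>")])
  (st.1.items, st.2.items)

-- ===== PORT B =====
-- the two-pointer while loop of Source B collecting (word, run length) pairs, as the obvious
-- structural recursion: each step consumes one run (takeWhile/dropWhile = the inner while)
def groupsRun : List String → List (String × Int)
  | [] => []
  | x :: t =>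
    (x, (1 + (t.takeWhile (fun y => y == x)).length : Int)) ::
      groupsRun (t.dropWhile (fun y => y == x))
termination_by l => l.length
decreasing_by
  simp only [List.length_cons]
  exact Nat.lt_succ_of_le (List.dropWhile_sublist _).length_le

-- literal transliteration of Source B
def gen_indices_alt (words : List String) (max_indices : Int) : (List (String × Int)) × (List (Int × String)) :=
  let sw := PySem.List.sorted words (fun w => w)
  let groups := groupsRun sw
  let ordered := PySem.List.sorted groups (fun g => -g.2)
  let k := max max_indices 0
  let top := PySem.List.slice ordered none (some k)
  let rest := PySem.List.slice ordered (some k) none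
  let words_to_ind := PySem.Dict.ofList
    ((PySem.List.enumerate top).map (fun p => (p.2.1, p.1 + 1)) ++ rest.map (fun g => (g.1, (0 : Int))))
  let ind_to_words := PySem.Dict.ofList
    (((0 : Int), "<UNK>") :: (PySem.List.enumerate top).map (fun p => (p.1 + 1, p.2.1)))
  (words_to_ind.items, ind_to_words.items)

-- ===== PRECONDITION & SPEC =====
def Spec_gen_indices (words : List String) (max_indices : Int) (out : (List (String × Int)) × (List (Int × String))) : Prop := out = gen_indices_alt words max_indices
instance (words : List String) (max_indices : Int) (out : (List (String × Int)) × (List (Int × String))) : Decidable (Spec_gen_indices words max_indices out) := by unfold Spec_gen_indices; infer_instance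

-- ===== CLAIM (what is proved, stated in full; the proofs are below) =====
def Claim_equal_gen_indices : Prop := ∀ (words : List String) (max_indices : Int), Dom_gen_indices words max_indices → Spec_gen_indices words max_indices (gen_indices words max_indices)

-- ===== LEMMAS AND PROOFS =====

-- the lexicographic key (-count, word) that Source A sorts by
def lexkey (p : String × Int) : Lex (Int × String) := toLex (-p.2, p.1)

lemma sorted2_eq_sorted_lex (xs : List (String × Int)) :
    PySem.List.sorted2 xs (fun x => -x.2) (fun x => x.1) =
      PySem.List.sorted xs lexkey := by
  show xs.foldl (fun acc x => PySem.List.insertBy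
      (fun a b => decide (-a.2 < (-b.2 : Int)) || (!decide (-b.2 < (-a.2 : Int)) && decide (a.1 < b.1))) x acc) []
    = xs.foldl (fun acc x => PySem.List.insertBy (fun a b => decide (lexkey a < lexkey b)) x acc) []
  have hfun : (fun (a b : String × Int) => decide (-a.2 < (-b.2 : Int)) || (!decide (-b.2 < (-a.2 : Int)) && decide (a.1 < b.1)))
      = (fun (a b : String × Int) => decide (lexkey a < lexkey b)) := by
    funext a b
    by_cases h1 : (-a.2 : Int) < -b.2
    · simp [lexkey, Prod.Lex.lt_iff, h1]
    · by_cases h2 : (-b.2 : Int) < -a.2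
      · have h3 : ¬ ((-a.2 : Int) = -b.2) := by omega
        simp [lexkey, Prod.Lex.lt_iff, h1, h2, h3]
      · have h3 : ((-a.2 : Int) = -b.2) := by omega
        simp [lexkey, Prod.Lex.lt_iff, h3]
  rw [hfun]

lemma enum_map_snd {α β : Type} (f : α → β) (xs : List α) : ∀ (s : Int),
    (PySem.List.enumerate xs s).map (fun p => f p.2) = xs.map f := by
  induction xs with
  | nil => intro s; simp [PySem.List.enumerate]
  | cons x t ih => intro s; simp [PySem.List.enumerate_cons, ih]

lemma filter_enum_lt (m : Int) {α : Type} (xs : List α) : ∀ s : Int,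
    (PySem.List.enumerate xs s).filter (fun p => decide (p.1 < m)) =
      PySem.List.enumerate (xs.take (m - s).toNat) s := by
  induction xs with
  | nil => intro s; simp [PySem.List.enumerate]
  | cons x t ih =>
    intro s
    rw [PySem.List.enumerate_cons]
    by_cases hs : s < m
    · have h1 : (m - s).toNat = (m - (s+1)).toNat + 1 := by omega
      rw [h1]
      simp only [List.take_succ_cons, PySem.List.enumerate_cons, List.filter_cons]
      simp [hs, ih (s+1)]
    · have h1 : (m - s).toNat = 0 := by omega
      rw [h1]
      simp only [List.take_zero, List.filter_cons]
      simp [hs, PySem.List.enumerate]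
      intro a b hp
      rcases (PySem.List.mem_enumerate_iff t (s+1) (a, b)).1 hp with ⟨k, hk, hke⟩
      have : a = s + 1 + k := by
        have := congrArg Prod.fst hke; simpa using this
      omega

lemma lexkey_lt_of_b1 (x y : String × Int) (h : ((-x.2 : Int) < -y.2)) : lexkey x < lexkey y := by
  simp [lexkey, Prod.Lex.lt_iff]; left; omega

lemma lexkey_lt_of_word (x y : String × Int) (h1 : ¬ ((-x.2 : Int) < -y.2)) (h2 : y.1 < x.1) :
    lexkey y < lexkey x := by
  simp [lexkey, Prod.Lex.lt_iff]
  rcases lt_or_eq_of_le (not_lt.1 h1) with h | h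
  · left; omega
  · right; exact ⟨by omega, by simpa using h2⟩

lemma insertBy_pairwise_lex (x : String × Int) (acc : List (String × Int))
    (hacc : acc.Pairwise (fun a b => lexkey a < lexkey b))
    (hx : ∀ y ∈ acc, y.1 < x.1) :
    (PySem.List.insertBy (fun a b => decide (-a.2 < -b.2)) x acc).Pairwise
      (fun a b => lexkey a < lexkey b) := by
  induction acc with
  | nil => simp [PySem.List.insertBy]
  | cons y ys ih =>
    rw [show PySem.List.insertBy (fun a b => decide (-a.2 < -b.2)) x (y :: ys)
        = if (-x.2 : Int) < -y.2 then x :: y :: ys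
          else y :: PySem.List.insertBy (fun a b => decide (-a.2 < -b.2)) x ys from by
      simp [PySem.List.insertBy]]
    rcases List.pairwise_cons.1 hacc with ⟨hy, hys⟩
    by_cases h : (-x.2 : Int) < -y.2
    · rw [if_pos h]
      refine List.pairwise_cons.2 ⟨?_, hacc⟩
      intro z hz
      rcases List.mem_cons.1 hz with rfl | hz
      · exact lexkey_lt_of_b1 x z h
      · exact lt_trans (lexkey_lt_of_b1 x y h) (hy z hz)
    · rw [if_neg h]
      refine List.pairwise_cons.2 ⟨?_, ih hys (fun z hz => hx z (List.mem_cons_of_mem _ hz))⟩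
      intro z hz
      rcases (PySem.List.mem_insertBy _ x z ys).1 hz with rfl | hz
      · exact lexkey_lt_of_word z y h (hx y (List.mem_cons_self))
      · exact hy z hz

lemma foldl_insertBy_pairwise_lex (gs : List (String × Int)) : ∀ (acc : List (String × Int)),
    acc.Pairwise (fun a b => lexkey a < lexkey b) →
    gs.Pairwise (fun p q => p.1 < q.1) →
    (∀ y ∈ acc, ∀ g ∈ gs, y.1 < g.1) →
    (gs.foldl (fun a x => PySem.List.insertBy (fun a b => decide (-a.2 < -b.2)) x a) acc).Pairwise
      (fun a b => lexkey a < lexkey b) := by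
  induction gs with
  | nil => intro acc hacc _ _; simpa using hacc
  | cons g gs ih =>
    intro acc hacc hgs hcross
    rcases List.pairwise_cons.1 hgs with ⟨hg, hgs'⟩
    simp only [List.foldl_cons]
    refine ih _ (insertBy_pairwise_lex g acc hacc (fun y hy => hcross y hy g List.mem_cons_self)) hgs' ?_
    intro y hy g' hg'
    rcases (PySem.List.mem_insertBy _ g y acc).1 hy with rfl | hy
    · exact hg g' hg'
    · exact hcross y hy g' (List.mem_cons_of_mem _ hg')

lemma groupsRun_spec (l : List String) (h : l.Pairwise (· ≤ ·)) :
    ((groupsRun l).map (fun p => p.1)).Pairwise (· < ·) ∧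
    (∀ w, w ∈ (groupsRun l).map (fun p => p.1) ↔ w ∈ l) ∧
    groupsRun l = ((groupsRun l).map (fun p => p.1)).map (fun w => (w, (l.count w : Int))) := by
  induction l using groupsRun.induct with
  | case1 => simp [groupsRun]
  | case2 x t ih =>
    have hpair := List.pairwise_cons.1 h
    have hxt : ∀ y ∈ t, x ≤ y := hpair.1
    have htp : t.Pairwise (· ≤ ·) := hpair.2
    set p : String → Bool := fun y => y == x with hp
    set tw := t.takeWhile p with htww
    set d := t.dropWhile p with hdd
    have htd : tw ++ d = t := List.takeWhile_append_dropWhile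
    have htw : ∀ y ∈ tw, y = x := by
      intro y hy
      have := List.mem_takeWhile_imp hy
      simpa [hp] using this
    have hdsub : d.Sublist t := List.dropWhile_sublist p
    have hdsorted : d.Pairwise (· ≤ ·) := htp.sublist hdsub
    have hd_lt : ∀ y ∈ d, x < y := by
      intro y hy
      rcases hde : d with _ | ⟨h0, d'⟩
      · simp [hde] at hy
      · have hne : d ≠ [] := by simp [hde]
        have hh0 : p (d.head hne) = false := List.head_dropWhile_not p hne
        have hh0x : h0 ≠ x := by
          have : d.head hne = h0 := by simp [hde]
          rw [this] at hh0; simpa [hp] using hh0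
        have hh0t : h0 ∈ t := hdsub.mem (by simp [hde])
        have hxh0 : x < h0 := lt_of_le_of_ne (hxt h0 hh0t) (Ne.symm hh0x)
        rw [hde] at hy
        rcases List.mem_cons.1 hy with rfl | hy'
        · exact hxh0
        · have := (List.pairwise_cons.1 (hde ▸ hdsorted)).1 y hy'
          exact lt_of_lt_of_le hxh0 this
    have hxd : x ∉ d := fun hx => lt_irrefl x (hd_lt x hx)
    have hcx : (((x :: t).count x : Int)) = 1 + (tw.length : Int) := by
      have h1 : (x :: t).count x = t.count x + 1 := List.count_cons_self
      have h2 : t.count x = tw.count x + d.count x := by rw [← htd, List.count_append]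
      have h3 : d.count x = 0 := List.count_eq_zero.2 hxd
      have h4 : tw.count x = tw.length := List.count_eq_length.2 (fun b hb => (htw b hb).symm)
      omega
    have hcw : ∀ w ∈ d, (x :: t).count w = d.count w := by
      intro w hw
      have hxw : x ≠ w := ne_of_lt (hd_lt w hw)
      have h1 : (x :: t).count w = t.count w := List.count_cons_of_ne hxw
      have h2 : t.count w = tw.count w + d.count w := by rw [← htd, List.count_append]
      have h3 : tw.count w = 0 := List.count_eq_zero.2 (fun hmem => hxw (htw w hmem).symm)
      omega
    obtain ⟨ih1, ih2, ih3⟩ := ih hdsorted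
    have hgr : groupsRun (x :: t) = (x, (1 + (tw.length : Int))) :: groupsRun d := by
      rw [groupsRun]
    refine ⟨?_, ?_, ?_⟩
    · rw [hgr]
      simp only [List.map_cons]
      refine List.pairwise_cons.2 ⟨?_, ih1⟩
      intro w hw
      have : w ∈ d := (ih2 w).1 hw
      exact hd_lt w this
    · intro w
      rw [hgr]
      simp only [List.map_cons, List.mem_cons]
      constructor
      · rintro (rfl | hw)
        · left; rfl
        · right; exact hdsub.mem ((ih2 w).1 hw)
      · rintro (rfl | hw')
        · left; rfl
        · rcases List.mem_append.1 ((htd ▸ hw' : w ∈ tw ++ d)) with hw'' | hw''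
          · left; exact htw w hw''
          · right; exact (ih2 w).2 hw''
    · rw [hgr]
      simp only [List.map_cons]
      congr 1
      · rw [← hcx]
      · conv_lhs => rw [ih3]
        apply List.map_congr_left
        intro w hw
        have hwd : w ∈ d := (ih2 w).1 hw
        simp [hcw w hwd]

-- Source B's ranking is a permutation of counter.items()
lemma ordered_perm_items (words : List String) :
    (PySem.List.sorted (groupsRun (PySem.List.sorted words (fun w => w))) (fun g => -g.2)).Perm
      (PySem.Dict.counter words).items := by
  have hsw : (PySem.List.sorted words (fun w => w)).Pairwise (· ≤ ·) :=
    PySem.List.sorted_pairwise words (fun w => w)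
  have hswperm : (PySem.List.sorted words (fun w => w)).Perm words :=
    PySem.List.sorted_perm words (fun w => w) false
  obtain ⟨hk1, hk2, hk3⟩ := groupsRun_spec _ hsw
  have hknd : ((groupsRun (PySem.List.sorted words (fun w => w))).map (fun p => p.1)).Nodup :=
    List.Pairwise.imp (fun h => ne_of_lt h) hk1
  have hgroups : groupsRun (PySem.List.sorted words (fun w => w)) =
      ((groupsRun (PySem.List.sorted words (fun w => w))).map (fun p => p.1)).map
        (fun w => (w, (words.count w : Int))) := by
    conv_lhs => rw [hk3]
    exact List.map_congr_left (fun w _ => by rw [hswperm.count_eq])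
  have hkeysperm : ((groupsRun (PySem.List.sorted words (fun w => w))).map (fun p => p.1)).Perm
      (PySem.Set.ofList words) := by
    refine (List.perm_ext_iff_of_nodup hknd (PySem.Set.nodup_ofList words)).2 (fun w => ?_)
    rw [hk2, PySem.Set.mem_ofList, hswperm.mem_iff]
  refine List.Perm.trans (PySem.List.sorted_perm _ _ false) ?_
  rw [PySem.Dict.items_counter words]
  conv_lhs => rw [hgroups]
  exact hkeysperm.map _

-- Source B's ranking is strictly sorted by the lexicographic key (-count, word)
lemma ordered_pairwise_lex (words : List String) :
    (PySem.List.sorted (groupsRun (PySem.List.sorted words (fun w => w))) (fun g => -g.2)).Pairwise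
      (fun a b => lexkey a < lexkey b) := by
  have hsw : (PySem.List.sorted words (fun w => w)).Pairwise (· ≤ ·) :=
    PySem.List.sorted_pairwise words (fun w => w)
  obtain ⟨hk1, _, _⟩ := groupsRun_spec _ hsw
  have hgs : (groupsRun (PySem.List.sorted words (fun w => w))).Pairwise (fun p q => p.1 < q.1) :=
    (List.pairwise_map.1 hk1)
  show ((groupsRun (PySem.List.sorted words (fun w => w))).foldl
      (fun a x => PySem.List.insertBy (fun a b => decide (-a.2 < -b.2)) x a) []).Pairwise
      (fun a b => lexkey a < lexkey b)
  exact foldl_insertBy_pairwise_lex _ [] (by simp) hgs (by simp)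

-- THE SORT EQUALITY: Source A's sorted(counter.items(), key=(-c,w)) is Source B's stable sort of the runs
lemma count_pairs_eq (words : List String) :
    PySem.List.sorted2 (PySem.Dict.counter words).items (fun x => -x.2) (fun x => x.1) =
      PySem.List.sorted (groupsRun (PySem.List.sorted words (fun w => w))) (fun g => -g.2) := by
  rw [sorted2_eq_sorted_lex]
  exact PySem.List.sorted_eq_of_perm_of_pairwise_lt _ _ lexkey
    (ordered_perm_items words) (ordered_pairwise_lex words)

-- a dict literal / dict() built from distinct keys reads back as the same association list
lemma ofList_items {κ ν : Type} [BEq κ] [LawfulBEq κ] (ps : List (κ × ν))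
    (h : (ps.map (fun p => p.1)).Nodup) : (PySem.Dict.ofList ps).items = ps := by
  show (ps.foldl (fun acc p => acc.insert p.1 p.2) PySem.Dict.empty).items = ps
  rw [PySem.Dict.items_foldl_insert_fresh ps (fun p => p.1) (fun p => p.2) _
    (fun a _ => by simp [PySem.Dict.contains_empty]) h]
  rw [show PySem.Dict.empty.items = ([] : List (κ × ν)) from rfl, List.nil_append]
  rw [show (fun (a : κ × ν) => (a.1, a.2)) = id from rfl, List.map_id]

-- the common ranked list L, generalized: all that matters below is that its words are distinct
lemma dicts_eq (m : Int) (L : List (String × Int)) (hnd : (L.map (fun p => p.1)).Nodup) :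
    ((List.foldl
        (fun (st : PySem.Dict String Int × PySem.Dict Int String) (p : Int × (String × Int)) =>
          if p.1 < m then (st.1.insert p.2.1 (p.1 + 1), st.2.insert (p.1 + 1) p.2.1)
          else (st.1.insert p.2.1 0, st.2))
        (PySem.Dict.empty, PySem.Dict.ofList [(0, "<UNK>")]) (PySem.List.enumerate L)).1.items,
     (List.foldl
        (fun (st : PySem.Dict String Int × PySem.Dict Int String) (p : Int × (String × Int)) =>
          if p.1 < m then (st.1.insert p.2.1 (p.1 + 1), st.2.insert (p.1 + 1) p.2.1)
          else (st.1.insert p.2.1 0, st.2))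
        (PySem.Dict.empty, PySem.Dict.ofList [(0, "<UNK>")]) (PySem.List.enumerate L)).2.items) =
    ((PySem.Dict.ofList
        ((PySem.List.enumerate (PySem.List.slice L none (some (max m 0)))).map (fun p => (p.2.1, p.1 + 1)) ++
          (PySem.List.slice L (some (max m 0))).map (fun g => (g.1, (0 : Int))))).items,
     (PySem.Dict.ofList
        (((0 : Int), "<UNK>") ::
          (PySem.List.enumerate (PySem.List.slice L none (some (max m 0)))).map (fun p => (p.1 + 1, p.2.1)))).items) := by
  have hk0 : (0 : Int) ≤ max m 0 := le_max_right _ _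
  rw [PySem.List.slice_to _ hk0, PySem.List.slice_from _ hk0]
  have hkt : (max m 0).toNat = m.toNat := by omega
  rw [hkt]
  have hF : (fun (st : PySem.Dict String Int × PySem.Dict Int String) (p : Int × (String × Int)) =>
        if p.1 < m then (st.1.insert p.2.1 (p.1 + 1), st.2.insert (p.1 + 1) p.2.1)
        else (st.1.insert p.2.1 0, st.2))
      = fun st p =>
        ((fun (d : PySem.Dict String Int) (p : Int × (String × Int)) =>
            d.insert p.2.1 (if p.1 < m then p.1 + 1 else 0)) st.1 p,
         (fun (d : PySem.Dict Int String) (p : Int × (String × Int)) =>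
            if p.1 < m then d.insert (p.1 + 1) p.2.1 else d) st.2 p) := by
    funext st p; by_cases h : p.1 < m <;> simp [h]
  rw [hF, PySem.List.foldl_prod_mk
    (f := fun (d : PySem.Dict String Int) (p : Int × (String × Int)) =>
      d.insert p.2.1 (if p.1 < m then p.1 + 1 else 0))
    (g := fun (d : PySem.Dict Int String) (p : Int × (String × Int)) =>
      if p.1 < m then d.insert (p.1 + 1) p.2.1 else d)]
  have hsplit : L = L.take m.toNat ++ L.drop m.toNat := (List.take_append_drop _ L).symm
  have hlen_top : (L.take m.toNat).length = min m.toNat L.length := List.length_take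
  have hlen_rest : (L.drop m.toNat).length = L.length - m.toNat := List.length_drop
  have henum : PySem.List.enumerate L 0 =
      PySem.List.enumerate (L.take m.toNat) 0 ++
        PySem.List.enumerate (L.drop m.toNat) (0 + (L.take m.toNat).length) := by
    conv_lhs => rw [hsplit]
    exact PySem.List.enumerate_append _ _ 0
  -- words of L, in order, are the keys appearing in every list below
  have hmap_top : (PySem.List.enumerate (L.take m.toNat) 0).map (fun p => p.2.1) =
      (L.take m.toNat).map (fun g => g.1) := enum_map_snd _ _ _
  have hnd_top_rest : ((L.take m.toNat).map (fun g => g.1) ++ (L.drop m.toNat).map (fun g => g.1)).Nodup := by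
    rw [← List.map_append, ← hsplit]; exact hnd
  -- index keys 1,2,… are strictly increasing hence distinct, and never 0
  have hnd_idx : ((PySem.List.enumerate (L.take m.toNat) 0).map (fun p => p.1 + 1)).Nodup := by
    have h1 := PySem.List.pairwise_lt_enumerate (L.take m.toNat) 0
    have h2 : ((PySem.List.enumerate (L.take m.toNat) 0).map (fun p => p.1 + 1)).Pairwise (· < ·) :=
      List.pairwise_map.2 (h1.imp (fun h => by omega))
    exact h2.imp ne_of_lt
  have hpos : ∀ p ∈ PySem.List.enumerate (L.take m.toNat) 0, 0 ≤ p.1 := by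
    intro p hp
    rcases (PySem.List.mem_enumerate_iff _ _ p).1 hp with ⟨j, hj, rfl⟩
    show (0 : Int) ≤ 0 + (j : Int)
    omega
  refine Prod.ext ?_ ?_
  · -- words_to_ind
    show (List.foldl (fun d p => d.insert p.2.1 (if p.1 < m then p.1 + 1 else 0))
        PySem.Dict.empty (PySem.List.enumerate L)).items = _
    rw [PySem.Dict.items_foldl_insert_fresh (PySem.List.enumerate L)
        (fun p => p.2.1) (fun p => if p.1 < m then p.1 + 1 else 0) _
        (fun a _ => by simp [PySem.Dict.contains_empty])
        (by have h := enum_map_snd (fun (g : String × Int) => g.1) L 0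
            rw [h]; exact hnd)]
    rw [ofList_items ((PySem.List.enumerate (L.take m.toNat)).map (fun p => (p.2.1, p.1 + 1)) ++
        (L.drop m.toNat).map (fun g => (g.1, (0 : Int)))) (by
      rw [List.map_append, List.map_map, List.map_map]
      have e1 : ((fun p => p.1) ∘ fun (p : Int × (String × Int)) => (p.2.1, p.1 + 1))
          = fun p => p.2.1 := rfl
      have e2 : ((fun p => p.1) ∘ fun (g : String × Int) => (g.1, (0 : Int)))
          = fun g => g.1 := rfl
      rw [e1, e2, hmap_top]
      exact hnd_top_rest)]
    rw [henum, List.map_append]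
    rw [show PySem.Dict.empty.items = ([] : List (String × Int)) from rfl, List.nil_append]
    congr 1
    · refine List.map_congr_left (fun p hp => ?_)
      rcases (PySem.List.mem_enumerate_iff _ _ p).1 hp with ⟨j, hj, rfl⟩
      have hcond : ((0 : Int) + j, (L.take m.toNat)[j]).1 < m := by
        show (0 : Int) + j < m
        rw [hlen_top] at hj; omega
      rw [if_pos hcond]
    · have hc : (PySem.List.enumerate (L.drop m.toNat) (0 + ((L.take m.toNat).length : Int))).map
            (fun p => (p.2.1, if p.1 < m then p.1 + 1 else 0))
          = (PySem.List.enumerate (L.drop m.toNat) (0 + ((L.take m.toNat).length : Int))).map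
            (fun p => (p.2.1, (0 : Int))) := by
        refine List.map_congr_left (fun p hp => ?_)
        rcases (PySem.List.mem_enumerate_iff _ _ p).1 hp with ⟨j, hj, rfl⟩
        have hne : ¬ (((0 + ((L.take m.toNat).length : Int) + j,
            (L.drop m.toNat)[j]).1) < m) := by
          show ¬ ((0 + ((L.take m.toNat).length : Int) + j) < m)
          rw [hlen_top]
          rw [hlen_rest] at hj
          omega
        rw [if_neg hne]
      rw [hc]
      exact enum_map_snd (fun g => (g.1, (0 : Int))) (L.drop m.toNat)
        (0 + ((L.take m.toNat).length : Int))
  · -- ind_to_words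
    show (List.foldl (fun d p => if p.1 < m then d.insert (p.1 + 1) p.2.1 else d)
        (PySem.Dict.ofList [(0, "<UNK>")]) (PySem.List.enumerate L)).items =
      (PySem.Dict.ofList
        (((0 : Int), "<UNK>") ::
          (PySem.List.enumerate (L.take m.toNat)).map (fun p => (p.1 + 1, p.2.1)))).items
    rw [PySem.List.foldl_ite_eq_foldl_filter
        (p := fun (q : Int × (String × Int)) => q.1 < m)
        (f := fun (d : PySem.Dict Int String) (q : Int × (String × Int)) =>
          d.insert (q.1 + 1) q.2.1)
        (l := PySem.List.enumerate L) (init := PySem.Dict.ofList [((0 : Int), "<UNK>")])]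
    rw [filter_enum_lt m L 0]
    simp only [sub_zero]
    rw [PySem.Dict.items_foldl_insert_fresh (PySem.List.enumerate (L.take m.toNat) 0)
        (fun p => p.1 + 1) (fun p => p.2.1) _
        (fun a ha => by
          have h0 : (0 : Int) ≤ a.1 := hpos a ha
          show (PySem.Dict.ofList [((0 : Int), "<UNK>")]).contains (a.1 + 1) = false
          rw [show PySem.Dict.ofList [((0 : Int), "<UNK>")]
              = PySem.Dict.mk [((0 : Int), "<UNK>")] from rfl]
          rw [PySem.Dict.contains_mk]
          have hne : ¬ ((0 : Int) = a.1 + 1) := by omega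
          simp [hne])
        hnd_idx]
    rw [ofList_items (((0 : Int), "<UNK>") ::
        (PySem.List.enumerate (L.take m.toNat)).map (fun p => (p.1 + 1, p.2.1))) (by
      rw [List.map_cons, List.map_map]
      have e1 : ((fun p => p.1) ∘ fun (p : Int × (String × Int)) => (p.1 + 1, p.2.1))
          = fun p => p.1 + 1 := rfl
      rw [e1]
      refine List.nodup_cons.2 ⟨?_, hnd_idx⟩
      intro h0
      rcases List.mem_map.1 h0 with ⟨p, hp, he⟩
      have := hpos p hp
      omega)]
    rfl

theorem gen_indices_eq (words : List String) (max_indices : Int) :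
    gen_indices words max_indices = gen_indices_alt words max_indices := by
  simp only [gen_indices, gen_indices_alt]
  rw [count_pairs_eq]
  have hnd : ((PySem.List.sorted (groupsRun (PySem.List.sorted words (fun w => w)))
      (fun g => -g.2)).map (fun p => p.1)).Nodup := by
    have h1 := (ordered_perm_items words).map (fun p => p.1)
    rw [PySem.Dict.items_counter words, List.map_map] at h1
    have e1 : ((fun p => p.1) ∘ fun (k : String) => (k, (words.count k : Int)))
        = fun k => k := rfl
    rw [e1, List.map_id'] at h1
    exact h1.symm.nodup (PySem.Set.nodup_ofList words)
  exact dicts_eq max_indices _ hnd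

-- ===== VERDICT (by name: the statement is the Claim_ definition above) =====
theorem gen_indices_spec : Claim_equal_gen_indices := by
  intro words max_indices _
  unfold Spec_gen_indices
  exact gen_indices_eq words max_indices
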